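-- pv_equiv track=rewrite | github.com/Infrapink/calconv | solun.py | gregorian_nyd
-- ===== SOURCE A (Python) =====
-- gregorian_epoch = 1721426 - 366 # 1st January of the year 0
--
-- gregorian_cycle = (400 * 365) + 97 # 400 years in the Gregorian calendar
--
-- solar4 = (4 * 365) + 1 # 3 years of 365 days and one leap year of 366 days
--
-- def gregorian_year_length(year):
--     '''Returns the number of days in a Gregorian year'''
--     year = int(year)
--
--     if (year % 400 == 0):
--         ans = 366
--     elif (year % 100 == 0):
--         ans = 365
--     elif (year % 4 == 0):
--         ans = 366
--     else:
--         ans = 365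
--
--     return ans
--
-- def gregorian_nyd(year, z):
--     '''Compute New Year's Day for a given year in the Gregorian calendar'''
--     year = int(year) # the year in question
--     z = bool(z) # is there a year 0?
--     if (year < 1):
--         year += int(not(z))
--
--     cycles = year // 400
--     y = 400 * cycles
--     nyd = gregorian_epoch + (cycles * gregorian_cycle) # new year's day
--
--     if (y + 100 <= year):
--         y += 100
--         nyd += 36525
--         while (y + 100 <= year):
--             y += 100
--             nyd += 36524
--         if (y + 4 <= year):
--             y += 4
--             nyd += (4 * 365)
--
--     quads = (year - y) // 4
--     y += (4 * quads)
--     nyd += (solar4 * quads)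
--     while (y < year):
--         nyd += gregorian_year_length(y)
--         y += 1
--
--     return nyd
-- ===== SOURCE B (Python) =====
-- def gregorian_nyd(year, z):
--     '''Compute New Year's Day for a given year in the Gregorian calendar'''
--     year = int(year)
--     z = bool(z)
--     if year < 1:
--         year += int(not z)
--     # days elapsed from year 0 to `year`: 365 per year plus one per leap year in [0, year)
--     leaps = (year + 3) // 4 - (year + 99) // 100 + (year + 399) // 400
--     return 1721060 + 365 * year + leaps
-- ===== Notes on version B (the rewrite author's own statement) =====
-- stated objective: simpler
-- what changed: Replaced the 400-year-cycle / century while-loop / quad / per-year while-loop day accumulation with a single closed-form expression 1721060 + 365*year + ((year+3)//4 - (year+99)//100 + (year+399)//400) counting leap years in [0, year) by floor division.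
import Mathlib
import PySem

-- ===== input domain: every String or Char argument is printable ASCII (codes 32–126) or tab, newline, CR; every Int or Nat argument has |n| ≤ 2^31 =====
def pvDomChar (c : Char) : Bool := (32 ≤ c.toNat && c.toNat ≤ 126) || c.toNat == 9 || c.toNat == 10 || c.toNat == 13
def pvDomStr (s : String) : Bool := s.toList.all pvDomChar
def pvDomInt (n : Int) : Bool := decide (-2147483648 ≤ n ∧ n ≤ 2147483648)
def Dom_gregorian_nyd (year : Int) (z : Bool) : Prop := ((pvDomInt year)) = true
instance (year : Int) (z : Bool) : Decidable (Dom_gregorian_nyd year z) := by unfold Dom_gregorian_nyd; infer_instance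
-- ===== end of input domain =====

-- B replaces A's 400-year-cycle / century / quad / per-year loop machinery with one
-- closed-form leap-count expression (objective: simpler).

-- ===== PORT A =====
def gregorian_epoch : Int := 1721426 - 366     -- 1st January of the year 0
def gregorian_cycle : Int := (400 * 365) + 97  -- 400 years in the Gregorian calendar
def solar4 : Int := (4 * 365) + 1              -- 3 years of 365 days and one leap year

def gregorian_year_length (year : Int) : Int :=
  if PySem.Int.mod year 400 = 0 then 366
  else if PySem.Int.mod year 100 = 0 then 365
  else if PySem.Int.mod year 4 = 0 then 366
  else 365

-- A's inner `while (y + 100 <= year)` loop; fuel only makes it total, the condition is checked as in Python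
def centuryLoop (year : Int) : Nat → Int × Int → Int × Int
  | 0, s => s
  | n+1, (y, nyd) => if y + 100 ≤ year then centuryLoop year n (y + 100, nyd + 36524) else (y, nyd)

-- A's final `while (y < year)` loop
def yearLoop (year : Int) : Nat → Int × Int → Int
  | 0, (_, nyd) => nyd
  | n+1, (y, nyd) => if y < year then yearLoop year n (y + 1, nyd + gregorian_year_length y) else nyd

-- A's `if (y + 100 <= year): …` block
def centuryStage (year y nyd : Int) : Int × Int :=
  if y + 100 ≤ year then
    let s := centuryLoop year (year - (y + 100)).toNat (y + 100, nyd + 36525)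
    if s.1 + 4 ≤ year then (s.1 + 4, s.2 + 4 * 365) else s
  else (y, nyd)

-- A's `quads = …` lines followed by the final while loop
def quadStage (year y nyd : Int) : Int :=
  let quads := PySem.Int.floordiv (year - y) 4
  yearLoop year (year - (y + 4 * quads)).toNat (y + 4 * quads, nyd + solar4 * quads)

def gregorian_nyd_core (year : Int) : Int :=
  let cycles := PySem.Int.floordiv year 400
  let s := centuryStage year (400 * cycles) (gregorian_epoch + cycles * gregorian_cycle)
  quadStage year s.1 s.2

def gregorian_nyd (year : Int) (z : Bool) : Int :=
  let year := if year < 1 then year + (if z then 0 else 1) else year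
  gregorian_nyd_core year

-- ===== PORT B =====
def gregorian_nyd_alt_core (year : Int) : Int :=
  let leaps := PySem.Int.floordiv (year + 3) 4 - PySem.Int.floordiv (year + 99) 100
               + PySem.Int.floordiv (year + 399) 400
  1721060 + 365 * year + leaps

def gregorian_nyd_alt (year : Int) (z : Bool) : Int :=
  let year := if year < 1 then year + (if z then 0 else 1) else year
  gregorian_nyd_alt_core year

-- ===== PRECONDITION & SPEC =====
def Spec_gregorian_nyd (year : Int) (z : Bool) (out : Int) : Prop := out = gregorian_nyd_alt year z
instance (year : Int) (z : Bool) (out : Int) : Decidable (Spec_gregorian_nyd year z out) := by unfold Spec_gregorian_nyd; infer_instance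

-- ===== CLAIM (what is proved, stated in full; the proofs are below) =====
def Claim_equal_gregorian_nyd : Prop := ∀ (year : Int) (z : Bool), Dom_gregorian_nyd year z → Spec_gregorian_nyd year z (gregorian_nyd year z)

-- ===== LEMMAS AND PROOFS =====

theorem gyl_shift (t q : Int) : gregorian_year_length (t + 400 * q) = gregorian_year_length t := by
  unfold gregorian_year_length
  have h400 : PySem.Int.mod (t + 400 * q) 400 = PySem.Int.mod t 400 :=
    Int.add_mul_fmod_self_left t 400 q
  have h100 : PySem.Int.mod (t + 400 * q) 100 = PySem.Int.mod t 100 := by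
    have : t + 400 * q = t + 100 * (4 * q) := by ring
    rw [this]; exact Int.add_mul_fmod_self_left t 100 (4 * q)
  have h4 : PySem.Int.mod (t + 400 * q) 4 = PySem.Int.mod t 4 := by
    have : t + 400 * q = t + 4 * (100 * q) := by ring
    rw [this]; exact Int.add_mul_fmod_self_left t 4 (100 * q)
  rw [h400, h100, h4]

theorem centuryLoop_shift (n q c : Int) : ∀ (f : Nat) (y nyd : Int),
    centuryLoop (n + 400 * q) f (y + 400 * q, nyd + c)
      = ((centuryLoop n f (y, nyd)).1 + 400 * q, (centuryLoop n f (y, nyd)).2 + c) := by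
  intro f
  induction f with
  | zero => intro y nyd; rfl
  | succ m ih =>
    intro y nyd
    simp only [centuryLoop]
    by_cases h : y + 100 ≤ n
    · rw [if_pos (by omega), if_pos h]
      have ec : nyd + c + 36524 = nyd + 36524 + c := by ring
      rw [ec]
      have := ih (y + 100) (nyd + 36524)
      have e : y + 100 + 400 * q = y + 400 * q + 100 := by ring
      rw [e] at this
      exact this
    · rw [if_neg (by omega), if_neg h]

theorem yearLoop_shift (n q c : Int) : ∀ (f : Nat) (y nyd : Int),
    yearLoop (n + 400 * q) f (y + 400 * q, nyd + c) = yearLoop n f (y, nyd) + c := by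
  intro f
  induction f with
  | zero => intro y nyd; rfl
  | succ m ih =>
    intro y nyd
    simp only [yearLoop]
    by_cases h : y < n
    · rw [if_pos (by omega), if_pos h, gyl_shift]
      have ec : nyd + c + gregorian_year_length y = nyd + gregorian_year_length y + c := by ring
      rw [ec]
      have := ih (y + 1) (nyd + gregorian_year_length y)
      have e : y + 1 + 400 * q = y + 400 * q + 1 := by ring
      rw [e] at this
      exact this
    · rw [if_neg (by omega), if_neg h]

theorem centuryStage_shift (n q c y nyd : Int) :
    centuryStage (n + 400 * q) (y + 400 * q) (nyd + c)
      = ((centuryStage n y nyd).1 + 400 * q, (centuryStage n y nyd).2 + c) := by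
  unfold centuryStage
  by_cases h : y + 100 ≤ n
  · rw [if_pos (by omega), if_pos h]
    have efuel : (n + 400 * q - (y + 400 * q + 100)).toNat = (n - (y + 100)).toNat := by
      congr 1; ring
    have e1 : y + 400 * q + 100 = y + 100 + 400 * q := by ring
    have e2 : nyd + c + 36525 = nyd + 36525 + c := by ring
    rw [efuel, e1, e2, centuryLoop_shift]
    set s := centuryLoop n (n - (y + 100)).toNat (y + 100, nyd + 36525) with hs
    by_cases h4 : s.1 + 4 ≤ n
    · rw [if_pos (by omega), if_pos h4]
      simp only [Prod.mk.injEq]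
      exact ⟨by ring, by ring⟩
    · rw [if_neg (by omega), if_neg h4]
  · rw [if_neg (by omega), if_neg h]

theorem quadStage_shift (n q c y nyd : Int) :
    quadStage (n + 400 * q) (y + 400 * q) (nyd + c) = quadStage n y nyd + c := by
  simp only [quadStage]
  have ed : n + 400 * q - (y + 400 * q) = n - y := by ring
  rw [ed]
  set quads := PySem.Int.floordiv (n - y) 4 with hq
  have efuel : (n + 400 * q - (y + 400 * q + 4 * quads)).toNat = (n - (y + 4 * quads)).toNat := by
    congr 1; ring
  have e1 : y + 400 * q + 4 * quads = y + 4 * quads + 400 * q := by ring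
  have e2 : nyd + c + solar4 * quads = nyd + solar4 * quads + c := by ring
  rw [efuel, e1, e2, yearLoop_shift]

theorem core_shift (q r : Int) (hr0 : 0 ≤ r) (hr : r < 400) :
    gregorian_nyd_core (r + 400 * q) = gregorian_nyd_core r + 146097 * q := by
  simp only [gregorian_nyd_core]
  have hc : PySem.Int.floordiv (r + 400 * q) 400 = q := by
    have h0 : PySem.Int.floordiv r 400 = 0 := by
      rw [PySem.Int.floordiv_eq_iff_of_pos (by norm_num)]; omega
    have h1 : PySem.Int.floordiv (r + 400 * q) 400 = PySem.Int.floordiv r 400 + q :=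
      Int.add_mul_fdiv_left r q (show (400:Int) ≠ 0 by norm_num)
    rw [h1, h0, zero_add]
  have hc0 : PySem.Int.floordiv r 400 = 0 := by
    rw [PySem.Int.floordiv_eq_iff_of_pos (by norm_num)]; omega
  rw [hc, hc0]
  have hx : centuryStage (r + 400 * q) (400 * q) (gregorian_epoch + q * gregorian_cycle)
      = ((centuryStage r (400 * 0) (gregorian_epoch + 0 * gregorian_cycle)).1 + 400 * q,
         (centuryStage r (400 * 0) (gregorian_epoch + 0 * gregorian_cycle)).2 + 146097 * q) := by
    have h := centuryStage_shift r q (146097 * q) (400 * 0) (gregorian_epoch + 0 * gregorian_cycle)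
    have e1 : (400 : Int) * 0 + 400 * q = 400 * q := by ring
    have e2 : gregorian_epoch + 0 * gregorian_cycle + 146097 * q
        = gregorian_epoch + q * gregorian_cycle := by
      unfold gregorian_epoch gregorian_cycle; ring
    rw [e1, e2] at h
    exact h
  rw [hx]
  exact quadStage_shift r q (146097 * q) _ _

theorem altcore_shift (q r : Int) :
    gregorian_nyd_alt_core (r + 400 * q) = gregorian_nyd_alt_core r + 146097 * q := by
  unfold gregorian_nyd_alt_core
  have h4 : PySem.Int.floordiv (r + 400 * q + 3) 4 = PySem.Int.floordiv (r + 3) 4 + 100 * q := by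
    show Int.fdiv (r + 400 * q + 3) 4 = Int.fdiv (r + 3) 4 + 100 * q
    have e : r + 400 * q + 3 = (r + 3) + 4 * (100 * q) := by ring
    rw [e, Int.add_mul_fdiv_left (r + 3) (100 * q) (show (4:Int) ≠ 0 by norm_num)]
  have h100 : PySem.Int.floordiv (r + 400 * q + 99) 100 = PySem.Int.floordiv (r + 99) 100 + 4 * q := by
    show Int.fdiv (r + 400 * q + 99) 100 = Int.fdiv (r + 99) 100 + 4 * q
    have e : r + 400 * q + 99 = (r + 99) + 100 * (4 * q) := by ring
    rw [e, Int.add_mul_fdiv_left (r + 99) (4 * q) (show (100:Int) ≠ 0 by norm_num)]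
  have h400 : PySem.Int.floordiv (r + 400 * q + 399) 400 = PySem.Int.floordiv (r + 399) 400 + q := by
    show Int.fdiv (r + 400 * q + 399) 400 = Int.fdiv (r + 399) 400 + q
    have e : r + 400 * q + 399 = (r + 399) + 400 * q := by ring
    rw [e, Int.add_mul_fdiv_left (r + 399) q (show (400:Int) ≠ 0 by norm_num)]
  rw [h4, h100, h400]; ring

set_option maxRecDepth 20000 in
theorem base_case : ∀ r : Fin 400, gregorian_nyd_core (r : Int) = gregorian_nyd_alt_core (r : Int) := by
  decide

theorem core_eq (n : Int) : gregorian_nyd_core n = gregorian_nyd_alt_core n := by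
  have hq := PySem.Int.floordiv_mul_add_mod n 400
  have h0 : 0 ≤ PySem.Int.mod n 400 := PySem.Int.mod_nonneg n (by norm_num)
  have hlt : PySem.Int.mod n 400 < 400 := PySem.Int.mod_lt n (by norm_num)
  set q := PySem.Int.floordiv n 400 with hqdef
  set r := PySem.Int.mod n 400 with hrdef
  have hn : n = r + 400 * q := by omega
  have hb : gregorian_nyd_core r = gregorian_nyd_alt_core r := by
    have hr' : r.toNat < 400 := by omega
    have : (r.toNat : Int) = r := Int.toNat_of_nonneg h0
    have := base_case ⟨r.toNat, hr'⟩
    simpa [Int.toNat_of_nonneg h0] using this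
  rw [hn, core_shift q r h0 hlt, altcore_shift q r, hb]

-- ===== VERDICT (by name: the statement is the Claim_ definition above) =====
theorem gregorian_nyd_spec : Claim_equal_gregorian_nyd := by
  intro year z _
  unfold Spec_gregorian_nyd gregorian_nyd gregorian_nyd_alt
  exact core_eq _
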